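-- pv_equiv track=rewrite | github.com/Vedant-Sharma-39/Reflux | src/core/model_aif.py | _circular_majority
-- ===== SOURCE A (Python) =====
-- from typing import Dict, List, Tuple, Optional, Set
--
-- Susceptible = 1
--
-- Resistant   = 2
--
-- Compensated = 3
--
-- def _circular_majority(labels: List[int], w: int) -> List[int]:
--     """
--     Binary denoise over circular list: treat {Resistant,Compensated} as "mutant".
--     Outputs labels as either Resistant (mutant) or Susceptible (non-mutant).
--     """
--     if not labels or w is None or w <= 1:
--         return labels
--     n = len(labels)
--     out = labels[:]
--     half = w // 2
--     def is_mutant(t): return t in (Resistant, Compensated)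
--     for i in range(n):
--         idxs = [(i + k) % n for k in range(-half, half + 1)]
--         votes = sum(1 for j in idxs if is_mutant(labels[j]))
--         out[i] = Resistant if votes > len(idxs) // 2 else Susceptible
--     return out
-- ===== SOURCE B (Python) =====
-- Susceptible = 1
-- Resistant   = 2
-- Compensated = 3
--
-- def _circular_majority(labels, w):
--     # O(n) via prefix sums: window count = f(i+half+1) - f(i-half),
--     # where f(x) counts mutants among circular positions 0..x-1.
--     if not labels or w is None or w <= 1:
--         return labels
--     n = len(labels)
--     half = w // 2
--     pref = [0]
--     for t in labels:
--         pref.append(pref[-1] + (1 if t in (Resistant, Compensated) else 0))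
--     total = pref[n]
--
--     def f(x):
--         q, r = divmod(x, n)
--         return q * total + pref[r]
--
--     return [Resistant if f(i + half + 1) - f(i - half) > half else Susceptible
--             for i in range(n)]
-- ===== Notes on version B (the rewrite author's own statement) =====
-- stated objective: faster
-- what changed: Replaces the per-index re-scan of a (w//2)-radius circular window (O(n*w)) by a single prefix-sum table over the mutant indicator and a closed-form circular window count f(i+half+1)-f(i-half) per index (O(n)).
import Mathlib
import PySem

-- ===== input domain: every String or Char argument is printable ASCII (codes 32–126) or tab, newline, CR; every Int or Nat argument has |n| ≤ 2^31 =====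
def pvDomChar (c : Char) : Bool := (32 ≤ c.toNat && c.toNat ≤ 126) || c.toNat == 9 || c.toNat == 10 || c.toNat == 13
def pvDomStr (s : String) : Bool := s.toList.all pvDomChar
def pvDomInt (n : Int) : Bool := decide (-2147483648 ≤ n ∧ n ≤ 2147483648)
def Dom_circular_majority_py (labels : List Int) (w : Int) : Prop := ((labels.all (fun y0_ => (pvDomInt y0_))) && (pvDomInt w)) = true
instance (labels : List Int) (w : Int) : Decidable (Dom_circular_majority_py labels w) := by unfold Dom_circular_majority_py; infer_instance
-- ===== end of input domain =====

-- B replaces A's per-index window recount by a prefix-sum table over the mutant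
-- indicator with a closed-form circular window count f(hi)-f(lo); measured faster.

-- ===== PORT A =====
def pvMutA (t : Int) : Bool := t == 2 || t == 3

def circular_majority_py (labels : List Int) (w : Int) : List Int :=
  if labels = [] ∨ w ≤ 1 then labels
  else
    let n : Int := PySem.List.len labels
    let half : Int := PySem.Int.floordiv w 2
    (PySem.List.pyRange 0 n 1).foldl (fun out i =>
      let idxs : List Int := (PySem.List.pyRange (-half) (half + 1) 1).map
        (fun k => PySem.Int.mod (i + k) n)
      let votes : Int := (idxs.countP (fun j => pvMutA (PySem.List.pyGetD labels j 0)) : Int)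
      PySem.List.pySetD out i
        (if votes > PySem.Int.floordiv (PySem.List.len idxs) 2 then 2 else 1))
      labels

-- ===== PORT B =====
def circular_majority_py_alt (labels : List Int) (w : Int) : List Int :=
  if labels = [] ∨ w ≤ 1 then labels
  else
    let n : Int := PySem.List.len labels
    let half : Int := PySem.Int.floordiv w 2
    let pref : List Int := labels.foldl
      (fun a t => a ++ [PySem.List.pyGetD a (-1) 0 + (if t == 2 || t == 3 then (1 : Int) else 0)])
      [0]
    let total : Int := PySem.List.pyGetD pref n 0
    let f : Int → Int := fun x =>
      PySem.Int.floordiv x n * total + PySem.List.pyGetD pref (PySem.Int.mod x n) 0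
    (PySem.List.pyRange 0 n 1).map (fun i =>
      if f (i + half + 1) - f (i - half) > half then (2 : Int) else 1)

-- ===== PRECONDITION & SPEC =====
def Spec_circular_majority_py (labels : List Int) (w : Int) (out : List Int) : Prop := out = circular_majority_py_alt labels w
instance (labels : List Int) (w : Int) (out : List Int) : Decidable (Spec_circular_majority_py labels w out) := by unfold Spec_circular_majority_py; infer_instance

-- ===== CLAIM (what is proved, stated in full; the proofs are below) =====
def Claim_equal_circular_majority_py : Prop := ∀ (labels : List Int) (w : Int), Dom_circular_majority_py labels w → Spec_circular_majority_py labels w (circular_majority_py labels w)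

-- ===== LEMMAS AND PROOFS =====

-- mutant indicator, prefix sums, the circular counting function G, windowed indicator
def pvMu (t : Int) : Int := if t == 2 || t == 3 then 1 else 0

def pvS (l : List Int) (k : Nat) : Int := ((l.take k).map pvMu).sum

def pvG (l : List Int) (x : Int) : Int :=
  PySem.Int.floordiv x (l.length : Int) * pvS l l.length
    + pvS l (PySem.Int.mod x (l.length : Int)).toNat

def pvInd (l : List Int) (x : Int) : Int :=
  pvMu (l.getD (PySem.Int.mod x (l.length : Int)).toNat 0)

-- the fold building pref shifts over a committed prefix
theorem pv_pref_shift (l : List Int) (a : List Int) (y : Int) :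
    l.foldl (fun acc t => acc ++ [PySem.List.pyGetD acc (-1) 0 + (if t == 2 || t == 3 then (1:Int) else 0)]) (a ++ [y])
      = a ++ l.foldl (fun acc t => acc ++ [PySem.List.pyGetD acc (-1) 0 + (if t == 2 || t == 3 then (1:Int) else 0)]) [y] := by
  induction l generalizing a y with
  | nil => simp
  | cons t l ih =>
    simp only [List.foldl_cons, PySem.List.pyGetD_neg_one_append_singleton]
    rw [ih (a ++ [y])]
    have h1 : PySem.List.pyGetD [y] (-1) 0 = y := by
      simpa using PySem.List.pyGetD_neg_one_append_singleton (xs := ([] : List Int)) (x := y) (d := 0)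
    rw [ih [y], h1]
    simp

-- pref is the table of prefix sums
theorem pv_pref_eq (l : List Int) (x : Int) :
    l.foldl (fun acc t => acc ++ [PySem.List.pyGetD acc (-1) 0 + (if t == 2 || t == 3 then (1:Int) else 0)]) [x]
      = (List.range (l.length + 1)).map (fun k => x + pvS l k) := by
  induction l generalizing x with
  | nil => simp [pvS]
  | cons t l ih =>
    simp only [List.foldl_cons]
    have h1 : PySem.List.pyGetD [x] (-1) 0 = x := by
      simpa using PySem.List.pyGetD_neg_one_append_singleton (xs := ([] : List Int)) (x := x) (d := 0)
    rw [h1, pv_pref_shift, ih]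
    conv_rhs => rw [show (t :: l).length + 1 = l.length + 1 + 1 by simp, List.range_succ_eq_map,
      List.map_cons, List.map_map]
    simp only [List.singleton_append]
    congr 1
    · simp [pvS]
    · exact List.map_congr_left (fun k _ => by
        simp [pvS, pvMu, List.take_succ_cons, add_assoc])

theorem pvS_succ (l : List Int) (k : Nat) (hk : k < l.length) :
    pvS l (k + 1) = pvS l k + pvMu (l.getD k 0) := by
  simp only [pvS, List.map_take]
  rw [List.take_add_one, List.getElem?_eq_getElem (show k < (l.map pvMu).length by simpa using hk)]
  simp [List.getD, List.getElem?_eq_getElem hk]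

theorem pvG_succ (l : List Int) (hl : l ≠ []) (x : Int) :
    pvG l (x + 1) = pvG l x + pvInd l x := by
  have hn : 0 < l.length := List.length_pos_iff.mpr hl
  have hN : (0 : Int) < (l.length : Int) := by exact_mod_cast hn
  set N : Int := (l.length : Int) with hNdef
  have hfd : PySem.Int.floordiv x N = x / N := PySem.Int.floordiv_eq_ediv_of_pos hN
  have hfd1 : PySem.Int.floordiv (x + 1) N = (x + 1) / N := PySem.Int.floordiv_eq_ediv_of_pos hN
  have hmd : PySem.Int.mod x N = x % N := PySem.Int.mod_eq_emod_of_pos hN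
  have hmd1 : PySem.Int.mod (x + 1) N = (x + 1) % N := PySem.Int.mod_eq_emod_of_pos hN
  have hr0 : 0 ≤ x % N := Int.emod_nonneg x (by omega)
  have hrN : x % N < N := Int.emod_lt_of_pos x hN
  have hx : N * (x / N) + x % N = x := Int.mul_ediv_add_emod x N
  by_cases hc : x % N + 1 < N
  · have h1 : (x + 1) / N = x / N ∧ (x + 1) % N = x % N + 1 :=
      (Int.ediv_emod_unique hN).mpr (by constructor <;> omega)
    have hkk : (x % N).toNat < l.length := by omega
    have htn : ((x % N) + 1).toNat = (x % N).toNat + 1 := by omega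
    simp only [pvG, pvInd, hfd, hfd1, hmd, hmd1, h1.1, h1.2, htn, ← hNdef]
    rw [pvS_succ l _ hkk]
    ring
  · have hrNe : x % N + 1 = N := by omega
    have h1 : (x + 1) / N = x / N + 1 ∧ (x + 1) % N = 0 :=
      (Int.ediv_emod_unique hN).mpr (by constructor <;> [nlinarith; omega])
    have hlast : (x % N).toNat = l.length - 1 := by omega
    have hSn : pvS l l.length = pvS l (l.length - 1) + pvMu (l.getD (l.length - 1) 0) := by
      have := pvS_succ l (l.length - 1) (by omega)
      rw [show l.length - 1 + 1 = l.length by omega] at this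
      exact this
    simp only [pvG, pvInd, hfd, hfd1, hmd, hmd1, h1.1, h1.2, hlast, ← hNdef]
    rw [hSn]
    simp [pvS]
    ring

theorem pvG_telescope (l : List Int) (hl : l ≠ []) (len : Nat) (a : Int) :
    pvG l (a + (len : Int)) = pvG l a + ((List.range len).map (fun t : Nat => pvInd l (a + (t : Int)))).sum := by
  induction len with
  | zero => simp
  | succ m ih =>
    rw [List.range_succ]
    push_cast
    rw [show a + ((m : Int) + 1) = (a + (m : Int)) + 1 by ring, pvG_succ l hl, ih]
    simp [List.sum_append, add_assoc]

-- the write-loop of A fills positions with a pure function of the index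
theorem pv_foldl_set (g : Nat → Int) :
    ∀ (len s : Nat) (acc : List Int), s + len ≤ acc.length →
    List.foldl (fun o i => o.set i (g i)) acc (List.range' s len)
      = acc.take s ++ (List.range' s len).map g ++ acc.drop (s + len) := by
  intro len
  induction len with
  | zero => intro s acc h; simp
  | succ m ih =>
    intro s acc h
    rw [List.range'_succ, List.map_cons, List.foldl_cons]
    rw [ih (s + 1) (acc.set s (g s)) (by simp; omega)]
    have hs : s < acc.length := by omega
    have htake : (acc.set s (g s)).take (s + 1) = acc.take s ++ [g s] := by
      rw [List.set_eq_take_append_cons_drop, if_pos hs, List.take_append,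
        List.take_of_length_le (by simp)]
      rw [show s + 1 - (acc.take s).length = 1 from by simp; omega]
      simp
    rw [htake, List.drop_set_of_lt (by omega)]
    rw [show s + 1 + m = s + (m + 1) from by omega]
    simp [List.append_assoc]

-- A's window count over range(len0) is a difference of pvG values
theorem pv_count_range (l : List Int) (hl : l ≠ []) (len0 : Nat) (a : Int) :
    ((List.countP (fun t : Nat => pvMutA (l.getD (PySem.Int.mod (a + (t : Int)) (l.length : Int)).toNat 0))
        (List.range len0) : Nat) : Int)
      = pvG l (a + (len0 : Int)) - pvG l a := by
  rw [pvG_telescope l hl len0 a]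
  rw [show (List.range len0).map (fun t : Nat => pvInd l (a + (t : Int)))
      = (List.range len0).map (fun t : Nat =>
          if pvMutA (l.getD (PySem.Int.mod (a + (t : Int)) (l.length : Int)).toNat 0) then (1 : Int) else 0) from
    List.map_congr_left (fun t _ => by simp [pvInd, pvMu, pvMutA])]
  rw [PySem.List.sum_map_ite_one_zero]
  ring

-- ===== VERDICT (by name: the statement is the Claim_ definition above) =====
theorem circular_majority_py_spec : Claim_equal_circular_majority_py := by
  unfold Claim_equal_circular_majority_py
  intro labels w _
  unfold Spec_circular_majority_py circular_majority_py circular_majority_py_alt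
  by_cases hg : labels = [] ∨ w ≤ 1
  · rw [if_pos hg, if_pos hg]
  · rw [if_neg hg, if_neg hg]
    push_neg at hg
    obtain ⟨hne, hw⟩ := hg
    simp only [PySem.List.len_eq]
    have hn0 : 0 < labels.length := List.length_pos_iff.mpr hne
    have hN : (0 : Int) < (labels.length : Int) := by exact_mod_cast hn0
    set h := PySem.Int.floordiv w 2 with hhdef
    have hh1 : 1 ≤ h := by
      rw [hhdef]
      exact (PySem.Int.le_floordiv_iff_mul_le (by omega)).mpr (by omega)
    -- expand all ranges
    simp only [PySem.List.pyRange_one, sub_zero, Int.toNat_natCast, zero_add]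
    set len0 := ((h + 1) - -h).toNat with hlen0def
    have hlen0 : (len0 : Int) = 2 * h + 1 := by omega
    -- pref is the prefix-sum table
    rw [pv_pref_eq labels 0]
    simp only [zero_add]
    -- A's write loop is a map over the indices
    rw [List.foldl_map]
    simp only [PySem.List.pySetD_natCast]
    rw [List.range_eq_range' (n := labels.length), pv_foldl_set _ labels.length 0 labels (by omega)]
    simp only [List.take_zero, Nat.zero_add, List.drop_length, List.nil_append, List.append_nil]
    rw [← List.range_eq_range' (n := labels.length), List.map_map]
    apply List.map_congr_left
    intro k hk
    rw [List.mem_range] at hk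
    -- pointwise facts
    have harg : ∀ t : Int, (k : Int) + (-h + t) = (k : Int) - h + t := fun t => by ring
    have hget : ∀ x : Int, PySem.List.pyGetD labels (PySem.Int.mod x (labels.length : Int)) 0
        = labels.getD (PySem.Int.mod x (labels.length : Int)).toNat 0 := by
      intro x
      have h0 := PySem.Int.mod_nonneg x hN
      have h1 := PySem.Int.mod_lt x hN
      rw [PySem.List.pyGetD_eq_getElem _ _ h0 h1]
      rw [List.getD_eq_getElem _ _ (by omega)]
    have hfl : PySem.Int.floordiv (2 * h + 1) 2 = h :=
      (PySem.Int.floordiv_eq_iff_of_pos (by omega)).mpr ⟨by omega, by omega⟩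
    have hfG : ∀ x : Int,
        PySem.Int.floordiv x (labels.length : Int)
            * PySem.List.pyGetD ((List.range (labels.length + 1)).map (fun k => pvS labels k)) ((labels.length : Int)) 0
          + PySem.List.pyGetD ((List.range (labels.length + 1)).map (fun k => pvS labels k))
              (PySem.Int.mod x (labels.length : Int)) 0
          = pvG labels x := by
      intro x
      have h0 := PySem.Int.mod_nonneg x hN
      have h1 := PySem.Int.mod_lt x hN
      have htot : PySem.List.pyGetD ((List.range (labels.length + 1)).map (fun k => pvS labels k))
          ((labels.length : Int)) 0 = pvS labels labels.length := by
        rw [PySem.List.pyGetD_natCast]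
        exact PySem.List.getD_map_range _ _ _ _ (by omega)
      have hpr : PySem.List.pyGetD ((List.range (labels.length + 1)).map (fun k => pvS labels k))
          (PySem.Int.mod x (labels.length : Int)) 0
          = pvS labels (PySem.Int.mod x (labels.length : Int)).toNat := by
        rw [PySem.List.pyGetD_eq_getElem _ _ h0 (by simp; omega)]
        simp [show (PySem.Int.mod x (labels.length : Int)).toNat < labels.length + 1 from by omega]
      rw [htot, hpr, pvG]
    simp only [List.countP_map, Function.comp_def, List.length_map, List.length_range, harg, hget,
      hlen0, hfl, pv_count_range labels hne len0 ((k : Int) - h),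
      show (k : Int) - h + (2 * h + 1) = (k : Int) + h + 1 from by ring, hfG]
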